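-- pv_equiv track=rewrite | github.com/caiocrm/469 | bruteforce_matrix_pos.py | normalize_digits_keep_boundaries
-- ===== SOURCE A (Python) =====
-- from typing import Any, Dict, Iterable, List, Optional, Sequence, Tuple
--
-- def normalize_digits_keep_boundaries(s: str) -> Tuple[str, List[int]]:
--     digits: List[str] = []
--     boundaries: List[int] = []
--     prev_was_digit = False
--     for ch in s:
--         if ch.isdigit():
--             digits.append(ch)
--             prev_was_digit = True
--         else:
--             if prev_was_digit:
--                 boundaries.append(len(digits))
--             prev_was_digit = False
--     boundaries = sorted(set(b for b in boundaries if 0 < b < len(digits)))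
--     return "".join(digits), boundaries
-- ===== SOURCE B (Python) =====
-- def normalize_digits_keep_boundaries(s):
--     # Two-pointer scan collecting maximal digit runs, then cumulative run
--     # lengths over all runs except the last give the inner boundaries.
--     runs = []
--     i, n = 0, len(s)
--     while i < n:
--         if s[i].isdigit():
--             j = i + 1
--             while j < n and s[j].isdigit():
--                 j += 1
--             runs.append(s[i:j])
--             i = j
--         else:
--             i += 1
--     boundaries = []
--     total = 0
--     for r in runs[:-1]:
--         total += len(r)
--         boundaries.append(total)
--     return "".join(runs), boundaries
-- ===== Notes on version B (the rewrite author's own statement) =====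
-- stated objective: simpler
-- what changed: A's per-character state machine with a prev_was_digit flag followed by a filter/set/sorted cleanup pass is replaced by a two-pointer scan over maximal digit runs whose lengths are cumulatively summed over all runs except the last, so the filter, dedup and sort disappear.
import Mathlib
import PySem

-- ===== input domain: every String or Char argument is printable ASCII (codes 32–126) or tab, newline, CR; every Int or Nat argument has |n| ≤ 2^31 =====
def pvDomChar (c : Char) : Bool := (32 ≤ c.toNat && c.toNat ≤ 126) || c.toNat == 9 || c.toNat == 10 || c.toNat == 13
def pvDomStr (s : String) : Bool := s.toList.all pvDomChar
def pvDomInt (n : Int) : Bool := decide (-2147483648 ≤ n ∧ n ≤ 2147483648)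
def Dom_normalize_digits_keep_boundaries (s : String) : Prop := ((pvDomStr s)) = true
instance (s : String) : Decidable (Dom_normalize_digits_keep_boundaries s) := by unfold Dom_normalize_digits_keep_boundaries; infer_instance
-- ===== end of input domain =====

-- B replaces A's per-character state machine (a prev_was_digit flag plus a
-- post-hoc sorted(set(filter)) pass) by a two-pointer scan over maximal digit
-- runs followed by a cumulative sum of the run lengths except the last
-- (objective: simpler — the filter/dedup/sort pass disappears).

-- ===== PORT A =====
-- the for-loop of A: state (digits, boundaries, prev_was_digit)
def pvALoop : List Char → List Char → List Int → Bool → List Char × List Int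
  | [], digits, bnds, _ => (digits, bnds)
  | ch :: rest, digits, bnds, prev =>
    if PySem.Chars.isdigit ch then
      pvALoop rest (digits ++ [ch]) bnds true
    else
      pvALoop rest digits (if prev then bnds ++ [(digits.length : Int)] else bnds) false

def normalize_digits_keep_boundaries (s : String) : String × List Int :=
  let r := pvALoop s.toList [] [] false
  let digits := r.1
  -- boundaries = sorted(set(b for b in boundaries if 0 < b < len(digits)))
  let boundaries := PySem.List.sorted
      (PySem.Set.ofList (r.2.filter (fun b => decide (0 < b) && decide (b < (digits.length : Int)))))
      (fun x => x) false
  (String.ofList digits, boundaries)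

-- ===== PORT B =====
-- inner while loop: consume the digit span (returns the span and the rest)
def pvSpanDigits : List Char → List Char × List Char
  | [] => ([], [])
  | c :: t =>
    if PySem.Chars.isdigit c then
      let p := pvSpanDigits t
      (c :: p.1, p.2)
    else ([], c :: t)

theorem pvSpanDigits_snd_length_le (l : List Char) : (pvSpanDigits l).2.length ≤ l.length := by
  induction l with
  | nil => simp [pvSpanDigits]
  | cons c t ih =>
    simp only [pvSpanDigits]
    split
    · exact Nat.le_trans ih (Nat.le_succ _)
    · simp

-- outer while loop: collect the maximal digit runs
def pvRunsB : List Char → List (List Char)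
  | [] => []
  | c :: t =>
    if PySem.Chars.isdigit c then
      (c :: (pvSpanDigits t).1) :: pvRunsB (pvSpanDigits t).2
    else
      pvRunsB t
termination_by l => l.length
decreasing_by
  · exact Nat.lt_succ_of_le (pvSpanDigits_snd_length_le t)
  · simp

def normalize_digits_keep_boundaries_alt (s : String) : String × List Int :=
  let runs := pvRunsB s.toList
  -- total = 0; for r in runs[:-1]: total += len(r); boundaries.append(total)
  let res := runs.dropLast.foldl
      (fun st r => (st.1 + (r.length : Int), st.2 ++ [st.1 + (r.length : Int)]))
      ((0 : Int), ([] : List Int))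
  (String.ofList runs.flatten, res.2)

-- ===== PRECONDITION & SPEC =====
def Spec_normalize_digits_keep_boundaries (s : String) (out : String × List Int) : Prop := out = normalize_digits_keep_boundaries_alt s
instance (s : String) (out : String × List Int) : Decidable (Spec_normalize_digits_keep_boundaries s out) := by unfold Spec_normalize_digits_keep_boundaries; infer_instance

-- ===== CLAIM (what is proved, stated in full; the proofs are below) =====
def Claim_equal_normalize_digits_keep_boundaries : Prop := ∀ (s : String), Dom_normalize_digits_keep_boundaries s → Spec_normalize_digits_keep_boundaries s (normalize_digits_keep_boundaries s)

-- ===== LEMMAS AND PROOFS =====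

-- raw boundary stream of A's loop, started at digit count k with flag prev
def pvRaw : List Char → Bool → Nat → List Int
  | [], _, _ => []
  | c :: t, prev, k =>
    if PySem.Chars.isdigit c then pvRaw t true (k + 1)
    else (if prev then [(k : Int)] else []) ++ pvRaw t false k

theorem pvALoop_eq (l : List Char) : ∀ (d : List Char) (b : List Int) (prev : Bool),
    pvALoop l d b prev = (d ++ l.filter PySem.Chars.isdigit, b ++ pvRaw l prev d.length) := by
  induction l with
  | nil => intro d b prev; simp [pvALoop, pvRaw]
  | cons c t ih =>
    intro d b prev
    simp only [pvALoop, pvRaw, List.filter_cons]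
    by_cases h : PySem.Chars.isdigit c
    · simp [h, ih, List.append_assoc]
    · cases prev <;> simp [h, ih, List.append_assoc]

-- cumulative run-length sums starting from total t
def pvCums : List (List Char) → Int → List Int
  | [], _ => []
  | r :: rs, t => (t + (r.length : Int)) :: pvCums rs (t + (r.length : Int))

def pvSumLen (rs : List (List Char)) : Int := ((rs.map List.length).sum : Nat)

theorem pvSumLen_cons (r : List Char) (rs : List (List Char)) :
    pvSumLen (r :: rs) = (r.length : Int) + pvSumLen rs := by
  simp only [pvSumLen, List.map_cons, List.sum_cons]; push_cast; ring

theorem pvSpanDigits_eq (l : List Char) :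
    pvSpanDigits l = (l.takeWhile PySem.Chars.isdigit, l.dropWhile PySem.Chars.isdigit) := by
  induction l with
  | nil => simp [pvSpanDigits]
  | cons c t ih =>
    simp only [pvSpanDigits, List.takeWhile_cons, List.dropWhile_cons]
    by_cases h : PySem.Chars.isdigit c <;> simp [h, ih]

-- A's loop while the flag is up: emit nothing until the run ends; if a
-- non-digit follows, emit the count there
theorem pvRaw_true (l : List Char) : ∀ (k : Nat),
    pvRaw l true k =
      if (l.dropWhile PySem.Chars.isdigit).isEmpty then []
      else ((k + (l.takeWhile PySem.Chars.isdigit).length : Nat) : Int)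
             :: pvRaw (l.dropWhile PySem.Chars.isdigit) false (k + (l.takeWhile PySem.Chars.isdigit).length) := by
  induction l with
  | nil => intro k; simp [pvRaw]
  | cons c t ih =>
    intro k
    by_cases h : PySem.Chars.isdigit c
    · simp only [pvRaw, h, if_pos, List.takeWhile_cons, List.dropWhile_cons]
      rw [ih (k + 1)]
      split
      · rfl
      · rw [show k + 1 + (t.takeWhile PySem.Chars.isdigit).length
              = k + (c :: t.takeWhile PySem.Chars.isdigit).length from by
            simp only [List.length_cons]; omega]
    · simp only [pvRaw, h, List.takeWhile_cons, List.dropWhile_cons]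
      simp [h, pvRaw]

theorem pvRunsB_ne_nil (l : List Char) : ∀ r ∈ pvRunsB l, r ≠ [] := by
  induction l using pvRunsB.induct with
  | case1 => simp [pvRunsB]
  | case2 c t h ih =>
    simp only [pvRunsB, h, if_pos]
    intro r hr
    rcases List.mem_cons.mp hr with h1 | h1
    · simp [h1]
    · exact ih r h1
  | case3 c t h ih =>
    simpa [pvRunsB, h] using ih

theorem pvRunsB_flatten (l : List Char) :
    (pvRunsB l).flatten = l.filter PySem.Chars.isdigit := by
  induction l using pvRunsB.induct with
  | case1 => simp [pvRunsB]
  | case2 c t h ih =>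
    simp only [pvRunsB, h, if_pos, List.flatten_cons, List.filter_cons, ih]
    have : t.filter PySem.Chars.isdigit
        = t.takeWhile PySem.Chars.isdigit ++ (t.dropWhile PySem.Chars.isdigit).filter PySem.Chars.isdigit := by
      conv_lhs => rw [← List.takeWhile_append_dropWhile (p := PySem.Chars.isdigit) (l := t)]
      rw [List.filter_append, List.filter_eq_self.mpr (fun a ha => List.mem_takeWhile_imp ha)]
    simp [pvSpanDigits_eq, this]
  | case3 c t h ih =>
    simp [pvRunsB, h, ih]

theorem pvSumLen_eq_flatten_length (rs : List (List Char)) :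
    pvSumLen rs = (rs.flatten.length : Int) := by
  simp [pvSumLen]

-- the raw stream started with the flag down is the cumulative sums of the
-- runs, with the last total missing exactly when the string ends in a digit
theorem pvRaw_false (l : List Char) : ∀ (k : Nat),
    pvRaw l false k = pvCums (pvRunsB l) (k : Int)
    ∨ pvRaw l false k = (pvCums (pvRunsB l) (k : Int)).dropLast := by
  induction l using pvRunsB.induct with
  | case1 => intro k; left; simp [pvRaw, pvRunsB, pvCums]
  | case2 c t h ih =>
    intro k
    have ih' : ∀ k : Nat,
        pvRaw (t.dropWhile PySem.Chars.isdigit) false k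
          = pvCums (pvRunsB (t.dropWhile PySem.Chars.isdigit)) (k : Int)
        ∨ pvRaw (t.dropWhile PySem.Chars.isdigit) false k
          = (pvCums (pvRunsB (t.dropWhile PySem.Chars.isdigit)) (k : Int)).dropLast := by
      simpa [pvSpanDigits_eq] using ih
    simp only [pvRaw, h, if_pos, pvRunsB, pvSpanDigits_eq]
    rw [pvRaw_true]
    have harith : (((k + 1 + (t.takeWhile PySem.Chars.isdigit).length : Nat)) : Int)
        = (k : Int) + (((c :: t.takeWhile PySem.Chars.isdigit)).length : Int) := by
      simp only [List.length_cons]; push_cast; ring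
    by_cases hdwE : (t.dropWhile PySem.Chars.isdigit).isEmpty
    · have hnil : t.dropWhile PySem.Chars.isdigit = [] := by simpa using hdwE
      right
      simp [hnil, pvRunsB, pvCums]
    · rw [if_neg (by simpa using hdwE)]
      simp only [pvCums]
      rcases ih' (k + 1 + (t.takeWhile PySem.Chars.isdigit).length) with h1 | h1
      · left
        rw [h1, harith]
      · cases hrs : pvRunsB (t.dropWhile PySem.Chars.isdigit) with
        | nil =>
          left
          rw [h1, hrs, harith]
          simp [pvCums]
        | cons r rs =>
          right
          rw [h1, hrs, harith,
            List.dropLast_cons_of_ne_nil (by simp [pvCums] :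
              pvCums (r :: rs) ((k : Int) + (((c :: t.takeWhile PySem.Chars.isdigit)).length : Int)) ≠ [])]
  | case3 c t h ih =>
    intro k
    simp only [pvRaw, h, if_neg, Bool.false_eq_true, not_false_iff, pvRunsB]
    simpa using ih k

theorem pvCums_dropLast (rs : List (List Char)) : ∀ (t : Int),
    pvCums rs.dropLast t = (pvCums rs t).dropLast := by
  induction rs with
  | nil => intro t; simp [pvCums]
  | cons r rs ih =>
    intro t
    cases rs with
    | nil => simp [pvCums]
    | cons r' rs' =>
      have h1 : pvCums (r' :: rs') (t + (r.length : Int)) ≠ [] := by simp [pvCums]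
      rw [List.dropLast_cons_of_ne_nil (by simp : r' :: rs' ≠ ([] : List (List Char)))]
      rw [show pvCums (r :: (r' :: rs').dropLast) t
            = (t + (r.length : Int)) :: pvCums ((r' :: rs').dropLast) (t + (r.length : Int)) from rfl]
      rw [ih]
      rw [show pvCums (r :: r' :: rs') t
            = (t + (r.length : Int)) :: pvCums (r' :: rs') (t + (r.length : Int)) from rfl]
      rw [List.dropLast_cons_of_ne_nil h1]

theorem pvCums_bounds (rs : List (List Char)) : ∀ (t : Int), (∀ r ∈ rs, r ≠ []) →
    ∀ b ∈ pvCums rs t, t < b ∧ b ≤ t + pvSumLen rs := by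
  induction rs with
  | nil => intro t _ b hb; simp [pvCums] at hb
  | cons r rs ih =>
    intro t hne b hb
    have hrl : 0 < (r.length : Int) := by
      have := hne r (by simp)
      have : r.length ≠ 0 := fun hc => this (List.eq_nil_of_length_eq_zero hc)
      omega
    have hsum : 0 ≤ pvSumLen rs := by unfold pvSumLen; exact Int.natCast_nonneg _
    rcases List.mem_cons.mp hb with h1 | h1
    · subst h1; rw [pvSumLen_cons]; constructor <;> omega
    · have := ih (t + (r.length : Int)) (fun x hx => hne x (by simp [hx])) b h1
      rw [pvSumLen_cons]
      constructor <;> omega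

theorem pvCums_pairwise (rs : List (List Char)) : ∀ (t : Int), (∀ r ∈ rs, r ≠ []) →
    (pvCums rs t).Pairwise (· < ·) := by
  induction rs with
  | nil => intro t _; simp [pvCums]
  | cons r rs ih =>
    intro t hne
    simp only [pvCums, List.pairwise_cons]
    refine ⟨fun b hb => ?_, ih _ (fun x hx => hne x (by simp [hx]))⟩
    exact (pvCums_bounds rs _ (fun x hx => hne x (by simp [hx])) b hb).1

-- filtering 0 < b < total: when the last total is present it is dropped,
-- every strictly smaller partial sum is kept
theorem pvFilter_cums_full (rs : List (List Char)) : ∀ (t T : Int), (∀ r ∈ rs, r ≠ []) →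
    0 ≤ t → T = t + pvSumLen rs →
    (pvCums rs t).filter (fun b => decide (0 < b) && decide (b < T)) = (pvCums rs t).dropLast := by
  induction rs with
  | nil => intro t T _ _ _; simp [pvCums]
  | cons r rs ih =>
    intro t T hne ht hT
    have hrl : 0 < (r.length : Int) := by
      have := hne r (by simp)
      have : r.length ≠ 0 := fun hc => this (List.eq_nil_of_length_eq_zero hc)
      omega
    cases rs with
    | nil =>
      have : ¬ (t + (r.length : Int) < T) := by
        rw [hT, pvSumLen_cons]; simp [pvSumLen]
      simp [pvCums, this]
    | cons r' rs' =>
      have hr'l : 0 < (r'.length : Int) := by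
        have := hne r' (by simp)
        have : r'.length ≠ 0 := fun hc => this (List.eq_nil_of_length_eq_zero hc)
        omega
      have hsum : 0 ≤ pvSumLen rs' := by unfold pvSumLen; exact Int.natCast_nonneg _
      have hpos : 0 < t + (r.length : Int) := by omega
      have hlt : t + (r.length : Int) < T := by
        rw [hT, pvSumLen_cons, pvSumLen_cons]; omega
      have h1 : pvCums (r' :: rs') (t + (r.length : Int)) ≠ [] := by simp [pvCums]
      rw [show pvCums (r :: r' :: rs') t
            = (t + (r.length : Int)) :: pvCums (r' :: rs') (t + (r.length : Int)) from rfl]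
      rw [List.dropLast_cons_of_ne_nil h1]
      simp only [List.filter_cons, decide_eq_true hpos, decide_eq_true hlt,
        Bool.and_self, if_pos]
      rw [ih (t + (r.length : Int)) T (fun x hx => hne x (by simp [hx])) (by omega)
        (by rw [hT, pvSumLen_cons]; ring)]

theorem pvFilter_cums_inside (rs : List (List Char)) : ∀ (t T : Int), (∀ r ∈ rs, r ≠ []) →
    0 ≤ t → t + pvSumLen rs < T →
    (pvCums rs t).filter (fun b => decide (0 < b) && decide (b < T)) = pvCums rs t := by
  intro t T hne ht hT
  apply List.filter_eq_self.mpr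
  intro b hb
  have h := pvCums_bounds rs t hne b hb
  simp only [Bool.and_eq_true, decide_eq_true_eq]
  omega

-- B's fold over runs[:-1] is the cumulative-sum list
theorem pvFoldB (rs : List (List Char)) : ∀ (t : Int) (bs : List Int),
    rs.foldl (fun st r => (st.1 + (r.length : Int), st.2 ++ [st.1 + (r.length : Int)])) (t, bs)
      = (t + pvSumLen rs, bs ++ pvCums rs t) := by
  induction rs with
  | nil => intro t bs; simp [pvSumLen, pvCums]
  | cons r rs ih =>
    intro t bs
    simp only [List.foldl_cons, ih, pvCums, pvSumLen_cons, Prod.mk.injEq]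
    constructor
    · ring
    · simp

theorem pvBoundaries_eq (l : List Char) :
    (pvRaw l false 0).filter
        (fun b => decide (0 < b) && decide (b < ((l.filter PySem.Chars.isdigit).length : Int)))
      = (pvCums (pvRunsB l) 0).dropLast := by
  have hne := pvRunsB_ne_nil l
  have hT : ((l.filter PySem.Chars.isdigit).length : Int) = 0 + pvSumLen (pvRunsB l) := by
    rw [pvSumLen_eq_flatten_length, pvRunsB_flatten]; ring
  rcases pvRaw_false l 0 with h | h
  · rw [h]
    exact_mod_cast pvFilter_cums_full (pvRunsB l) 0 _ hne le_rfl hT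
  · rw [h, Nat.cast_zero, ← pvCums_dropLast]
    have hne' : ∀ r ∈ (pvRunsB l).dropLast, r ≠ [] := fun r hr =>
      hne r (List.dropLast_sublist _ |>.mem hr)
    by_cases hnil : pvRunsB l = []
    · simp [hnil, pvCums]
    · have hlast_ne : (pvRunsB l).getLast hnil ≠ [] := hne _ (List.getLast_mem _)
      have hsplit : pvRunsB l = (pvRunsB l).dropLast ++ [(pvRunsB l).getLast hnil] :=
        (List.dropLast_concat_getLast hnil).symm
      have hlastlen : 0 < (((pvRunsB l).getLast hnil).length : Int) := by
        have h0 : ((pvRunsB l).getLast hnil).length ≠ 0 := fun hc =>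
          hlast_ne (List.eq_nil_of_length_eq_zero hc)
        omega
      have hsum : pvSumLen (pvRunsB l)
          = pvSumLen ((pvRunsB l).dropLast) + (((pvRunsB l).getLast hnil).length : Int) := by
        conv_lhs => rw [hsplit]
        simp only [pvSumLen, List.map_append, List.sum_append, List.map_cons,
          List.sum_cons, List.map_nil, List.sum_nil]
        push_cast; ring
      apply pvFilter_cums_inside _ 0 _ hne' le_rfl
      rw [hT, hsum]
      omega

theorem pvPairwise_dropLast (l : List Char) :
    ((pvCums (pvRunsB l) 0).dropLast).Pairwise (· < ·) :=
  (pvCums_pairwise (pvRunsB l) 0 (pvRunsB_ne_nil l)).sublist (List.dropLast_sublist _)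

-- ===== VERDICT (by name: the statement is the Claim_ definition above) =====
theorem normalize_digits_keep_boundaries_spec : Claim_equal_normalize_digits_keep_boundaries := by
  intro s _
  unfold Spec_normalize_digits_keep_boundaries
  have hA : normalize_digits_keep_boundaries s
      = (String.ofList (s.toList.filter PySem.Chars.isdigit),
         PySem.List.sorted (PySem.Set.ofList ((pvRaw s.toList false 0).filter
           (fun b => decide (0 < b) && decide (b < ((s.toList.filter PySem.Chars.isdigit).length : Int)))))
           (fun x => x) false) := by
    unfold normalize_digits_keep_boundaries
    simp only [pvALoop_eq, List.nil_append, List.length_nil]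
  have hB : normalize_digits_keep_boundaries_alt s
      = (String.ofList (pvRunsB s.toList).flatten, pvCums ((pvRunsB s.toList).dropLast) 0) := by
    unfold normalize_digits_keep_boundaries_alt
    simp only [pvFoldB, List.nil_append]
  rw [hA, hB, pvRunsB_flatten, pvCums_dropLast]
  have hpw := pvPairwise_dropLast s.toList
  have hnd : ((pvCums (pvRunsB s.toList) 0).dropLast).Nodup :=
    hpw.imp (fun h => ne_of_lt h)
  rw [pvBoundaries_eq, PySem.Set.ofList_eq_self_of_nodup _ hnd,
    PySem.List.sorted_eq_self_of_pairwise _ _ (hpw.imp (fun h => le_of_lt h))]
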